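-- pv_equiv track=rewrite | github.com/Epicarno/cabinet-isolation | rename_kks.py | extract_cabinet
-- ===== SOURCE A (Python) =====
-- def extract_cabinet(dp_name: str, cab_to_block: dict[str, str]) -> str | None:
--     """Извлекаем имя шкафа из DP.
--
--     DP может быть:
--       SHD_03_1>P3_V3>DI>KZ1   — первый сегмент = шкаф
--       SHD_7_A1_2               — без >, весь DP начинается с имени шкафа
--       SHKZiAV_03_1_OIP_1       — без >, prefix matching по cab_to_block
--     """
--     if ">" in dp_name:
--         cab_candidate = dp_name.split(">")[0]
--         found = _find_cab(cab_candidate, cab_to_block)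
--         if found:
--             return found
--     else:
--         # Без разделителя — ищем самый длинный подходящий шкаф-префикс
--         best = None
--         for cab in cab_to_block:
--             if dp_name.lower().startswith(cab.lower()) and (best is None or len(cab) > len(best)):
--                 best = cab
--         return best
--     return None
--
-- def _find_cab(name: str, cab_to_block: dict[str, str]) -> str | None:
--     """Ищем шкаф в cab_to_block, допуская разницу в регистре (SHKZiAV vs SHKZIAV)."""
--     if name in cab_to_block:
--         return name
--     low = name.lower()
--     for cab in cab_to_block:
--         if cab.lower() == low:
--             return cab
--     return None
-- ===== SOURCE B (Python) =====
-- def extract_cabinet(dp_name: str, cab_to_block: dict[str, str]) -> str | None: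
--     # Index the cabinets once by their lowercased name (first-seen wins).
--     lowmap = {}
--     for cab in cab_to_block:
--         lowmap.setdefault(cab.lower(), cab)
--     if ">" in dp_name:
--         head = dp_name.partition(">")[0]
--         found = head if head in cab_to_block else lowmap.get(head.lower())
--         return found or None
--     # No separator: query the index with each prefix of dp_name, longest first.
--     low = dp_name.lower()
--     for L in range(len(low), -1, -1):
--         cab = lowmap.get(low[:L])
--         if cab is not None:
--             return cab
--     return None
-- ===== Notes on version B (the rewrite author's own statement) =====
-- stated objective: alternative
-- what changed: B builds a dict index keyed by each cabinet's lowercased name once (first-seen wins), answers the '>' branch with one membership test plus one index lookup instead of _find_cab's scan, and answers the no-'>' branch by probing the index with every prefix of dp_name from longest to shortest (one O(1) lookup per length) instead of A's running-best scan over all keys.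
import Mathlib
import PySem

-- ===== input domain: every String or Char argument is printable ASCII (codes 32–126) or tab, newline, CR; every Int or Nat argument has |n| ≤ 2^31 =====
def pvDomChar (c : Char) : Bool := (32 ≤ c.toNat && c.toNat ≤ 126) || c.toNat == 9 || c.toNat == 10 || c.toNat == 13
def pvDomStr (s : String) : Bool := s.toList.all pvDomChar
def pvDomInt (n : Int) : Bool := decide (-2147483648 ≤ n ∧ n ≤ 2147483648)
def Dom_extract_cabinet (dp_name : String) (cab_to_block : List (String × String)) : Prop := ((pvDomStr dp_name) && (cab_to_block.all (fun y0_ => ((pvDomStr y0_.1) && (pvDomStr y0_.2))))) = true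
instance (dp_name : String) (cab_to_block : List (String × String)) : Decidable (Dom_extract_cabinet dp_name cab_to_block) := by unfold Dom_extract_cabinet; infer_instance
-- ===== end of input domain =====

-- B indexes the cabinets once in a dict keyed by lowercased name (first-seen wins) and answers the no-'>' case by probing that index with each prefix of dp_name, longest first — replacing A's per-key running-best scan; the '>' branch becomes one membership test plus one index lookup. Objective: alternative (hash index + prefix-length probing instead of key scanning).


-- ===== PORT A =====
-- _find_cab: exact key match, else first case-insensitive match in dict order
def pvFindCab (name : String) (cab_to_block : List (String × String)) : Option String :=
  if (cab_to_block.map Prod.fst).contains name then some name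
  else
    let low := PySem.Str.lower name
    (cab_to_block.map Prod.fst).find? (fun cab => PySem.Str.lower cab == low)

def extract_cabinet (dp_name : String) (cab_to_block : List (String × String)) : Option String :=
  if PySem.Str.isIn ">" dp_name then
    let cab_candidate := ((PySem.Str.split? dp_name ">").getD []).headD ""
    match pvFindCab cab_candidate cab_to_block with
    | some f => if f == "" then none else some f   -- Python truthiness: 'if found:'
    | none => none
  else
    -- running best over the dict keys: longest (first-seen) lowercase-prefix match
    (cab_to_block.map Prod.fst).foldl (fun best cab =>
      if PySem.Str.startswith (PySem.Str.lower dp_name) (PySem.Str.lower cab) &&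
         (match best with
          | none => true
          | some b => decide (PySem.Str.len cab > PySem.Str.len b))
      then some cab else best) none

-- ===== PORT B =====
-- lowmap = {}; for cab in cab_to_block: lowmap.setdefault(cab.lower(), cab)
def pvLowmap (cab_to_block : List (String × String)) : PySem.Dict String String :=
  (cab_to_block.map Prod.fst).foldl
    (fun d cab => d.setdefault (PySem.Str.lower cab) cab) PySem.Dict.empty

def extract_cabinet_alt (dp_name : String) (cab_to_block : List (String × String)) : Option String :=
  let lowmap := pvLowmap cab_to_block
  if PySem.Str.isIn ">" dp_name then
    let head := ((PySem.Str.split? dp_name ">").getD []).headD ""   -- dp_name.partition(">")[0]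
    let found :=
      if (cab_to_block.map Prod.fst).contains head then some head
      else lowmap.get? (PySem.Str.lower head)
    match found with                                -- 'return found or None' (Python truthiness)
    | some f => if f == "" then none else some f
    | none => none
  else
    -- for L in range(len(low), -1, -1): probe lowmap with low[:L], return on first hit
    let low := PySem.Str.lower dp_name
    (PySem.List.pyRange (PySem.Str.len low) (-1) (-1)).findSome?
      (fun L => lowmap.get? (PySem.Str.slice low none (some L)))

-- ===== PRECONDITION & SPEC =====
def Spec_extract_cabinet (dp_name : String) (cab_to_block : List (String × String)) (out : Option String) : Prop := out = extract_cabinet_alt dp_name cab_to_block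
instance (dp_name : String) (cab_to_block : List (String × String)) (out : Option String) : Decidable (Spec_extract_cabinet dp_name cab_to_block out) := by unfold Spec_extract_cabinet; infer_instance

-- ===== CLAIM (what is proved, stated in full; the proofs are below) =====
def Claim_equal_extract_cabinet : Prop := ∀ (dp_name : String) (cab_to_block : List (String × String)), Dom_extract_cabinet dp_name cab_to_block → Spec_extract_cabinet dp_name cab_to_block (extract_cabinet dp_name cab_to_block)

-- ===== LEMMAS AND PROOFS =====

-- the lowercased form of a cabinet name, as a char list (proof-side view of B's index keys)
def pvKey (c : String) : List Char := PySem.Chars.lower c.toList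

-- first-seen-longest accumulator, phrased on pvKey lengths
def pvMaxF (acc : Option String) (x : String) : Option String :=
  match acc with
  | none => some x
  | some m => if (pvKey m).length < (pvKey x).length then some x else some m

-- [n, n-1, ..., 0] (proof-side image of range(n, -1, -1))
def pvDesc : Nat → List Nat
  | 0 => [0]
  | n + 1 => (n + 1) :: pvDesc n

theorem pv_desc_range (n : Nat) :
    (pvDesc n).map (fun i => Int.ofNat i) = (List.range (n+1)).map (fun j => Int.ofNat n - Int.ofNat j) := by
  induction n with
  | zero => decide
  | succ k ih =>
    simp only [Int.ofNat_eq_natCast] at ih ⊢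
    rw [List.range_succ_eq_map]
    simp only [pvDesc, List.map_cons, List.map_map, Function.comp_def]
    congr 1
    push_cast
    rw [ih]
    apply List.map_congr_left; intro a _; ring

-- range(n, -1, -1) is pvDesc n, cast to Int
theorem pv_pyRange_desc (n : Nat) :
    PySem.List.pyRange (↑n) (-1) (-1) = (pvDesc n).map (fun i => Int.ofNat i) := by
  rw [pv_desc_range]
  simp only [PySem.List.pyRange, Int.ofNat_eq_natCast]
  norm_num
  rw [if_pos (show (-1:Int) < ↑n by omega)]
  apply List.map_congr_left; intro a _; ring

-- B's index loop, queried at s, yields the first key whose lowercase is s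
theorem pv_lowmap_get (keys : List String) (d : PySem.Dict String String) (s : String) :
    (keys.foldl (fun d cab => d.setdefault (PySem.Str.lower cab) cab) d).get? s
    = (match d.get? s with
       | some v => some v
       | none => keys.find? (fun cab => PySem.Str.lower cab == s)) := by
  induction keys generalizing d with
  | nil => cases h : d.get? s <;> simp [h]
  | cons c t ih =>
    rw [List.foldl_cons, ih]
    by_cases hc : d.contains (PySem.Str.lower c) = true
    · rw [PySem.Dict.setdefault_of_contains _ _ hc]
      rw [PySem.Dict.contains_eq_isSome_get?] at hc
      cases hd : d.get? s with
      | some v => rfl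
      | none =>
        rw [List.find?_cons]
        by_cases he : (PySem.Str.lower c == s) = true
        · exfalso; rw [eq_of_beq he, hd] at hc; simp at hc
        · simp only [Bool.not_eq_true] at he; rw [he]
    · rw [PySem.Dict.setdefault_of_not_contains _ _ (by simpa using hc)]
      rw [PySem.Dict.get?_insert]
      rw [PySem.Dict.contains_eq_isSome_get?] at hc
      by_cases he : s = PySem.Str.lower c
      · subst he
        simp only [Bool.not_eq_true, Option.isSome_eq_false_iff, Option.isNone_iff_eq_none] at hc
        rw [hc, if_pos rfl, List.find?_cons]
        simp
      · rw [if_neg he]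
        cases hd : d.get? s with
        | some v => rfl
        | none =>
          rw [List.find?_cons]
          have : (PySem.Str.lower c == s) = false := by
            simp only [beq_eq_false_iff_ne, ne_eq]
            exact fun h => he h.symm
          rw [this]

theorem pv_lowmap_find (cab_to_block : List (String × String)) (s : String) :
    (pvLowmap cab_to_block).get? s
    = (cab_to_block.map Prod.fst).find? (fun cab => PySem.Str.lower cab == s) := by
  rw [pvLowmap, pv_lowmap_get, PySem.Dict.get?_empty]

-- an accumulator at maximal key length is never replaced
theorem pv_fold_keep (t : List String) (a : String)
    (h : ∀ c ∈ t, (pvKey c).length ≤ (pvKey a).length) :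
    t.foldl pvMaxF (some a) = some a := by
  induction t with
  | nil => rfl
  | cons x t ih =>
    rw [List.foldl_cons]
    have hx := h x (by simp)
    simp only [pvMaxF, if_neg (not_lt.mpr hx)]
    exact ih (fun c hc => h c (by simp [hc]))

-- from an accumulator strictly below m, the fold lands on the first element of key length m
theorem pv_fold_from_acc (m : Nat) (c₀ : String) :
    ∀ (t : List String) (a : String),
      (∀ c ∈ t, (pvKey c).length ≤ m) → (pvKey a).length < m →
      t.find? (fun c => (pvKey c).length == m) = some c₀ →
      t.foldl pvMaxF (some a) = some c₀ := by
  intro t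
  induction t with
  | nil => intro a _ _ hfind; simp at hfind
  | cons x t ih =>
    intro a hle ha hfind
    rw [List.find?_cons] at hfind
    rw [List.foldl_cons]
    by_cases hx : ((pvKey x).length == m) = true
    · rw [hx] at hfind
      obtain rfl : x = c₀ := by injection hfind
      have hxm : (pvKey x).length = m := by simpa using hx
      simp only [pvMaxF, if_pos (hxm ▸ ha)]
      exact pv_fold_keep t x (fun c hc => hxm ▸ hle c (by simp [hc]))
    · rw [Bool.not_eq_true] at hx
      rw [hx] at hfind
      have hxm : (pvKey x).length < m :=
        lt_of_le_of_ne (hle x (by simp)) (by simpa using hx)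
      have hle' : ∀ c ∈ t, (pvKey c).length ≤ m := fun c hc => hle c (by simp [hc])
      simp only [pvMaxF]
      split_ifs with h
      · exact ih x hle' hxm hfind
      · exact ih a hle' ha hfind

-- first-seen-longest fold = first element of maximal key length m (all lengths ≤ m)
theorem pv_fold_find (m : Nat) (c₀ : String) (F : List String)
    (hle : ∀ c ∈ F, (pvKey c).length ≤ m)
    (hf : F.find? (fun c => (pvKey c).length == m) = some c₀) :
    F.foldl pvMaxF none = some c₀ := by
  cases F with
  | nil => simp at hf
  | cons x t =>
    rw [List.foldl_cons]
    rw [show pvMaxF none x = some x from rfl]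
    rw [List.find?_cons] at hf
    by_cases hx : ((pvKey x).length == m) = true
    · rw [hx] at hf
      obtain rfl : x = c₀ := by injection hf
      have hxm : (pvKey x).length = m := by simpa using hx
      exact pv_fold_keep t x (fun c hc => hxm ▸ hle c (by simp [hc]))
    · rw [Bool.not_eq_true] at hx
      rw [hx] at hf
      have hxm : (pvKey x).length < m :=
        lt_of_le_of_ne (hle x (by simp)) (by simpa using hx)
      exact pv_fold_from_acc m c₀ t x (fun c hc => hle c (by simp [hc])) hxm hf

-- searching keys for an exact L-prefix = searching the (≤ L)-filtered matches for key length L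
theorem pv_find_bridge (keys : List String) (w : List Char) (L : Nat) (hL : L ≤ w.length) :
    keys.find? (fun c => pvKey c == w.take L)
    = (keys.filter (fun c => (pvKey c).isPrefixOf w && decide ((pvKey c).length ≤ L))).find?
        (fun c => (pvKey c).length == L) := by
  rw [List.find?_filter]
  symm
  congr 1
  funext c
  apply Bool.eq_iff_iff.mpr
  simp only [decide_eq_true_eq, Bool.and_eq_true, List.isPrefixOf_iff_prefix,
    beq_iff_eq]
  constructor
  · rintro ⟨⟨hpre, -⟩, hlen⟩
    rw [List.prefix_iff_eq_take.mp hpre, hlen]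
  · intro h
    have hlen : (pvKey c).length = L := by
      rw [h, List.length_take]; omega
    refine ⟨⟨?_, by omega⟩, hlen⟩
    rw [h]; exact List.take_prefix L w

-- MAIN: descending prefix probing = first-seen-longest over the (length-bounded) prefix matches
theorem pv_main (keys : List String) (w : List Char) :
    ∀ (n : Nat), n ≤ w.length →
      (pvDesc n).findSome? (fun L => keys.find? (fun c => pvKey c == w.take L))
      = (keys.filter (fun c => (pvKey c).isPrefixOf w && decide ((pvKey c).length ≤ n))).foldl
          pvMaxF none := by
  intro n
  induction n with
  | zero =>
    intro _
    have hb := pv_find_bridge keys w 0 (by omega)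
    cases hf : (keys.filter (fun c => (pvKey c).isPrefixOf w && decide ((pvKey c).length ≤ 0))).find?
        (fun c => (pvKey c).length == 0) with
    | some c₀ =>
      rw [hf] at hb
      simp only [pvDesc, List.findSome?_cons, hb]
      exact (pv_fold_find 0 c₀ _ (fun c hc => by
        have := (List.mem_filter.mp hc).2
        simp only [Bool.and_eq_true, decide_eq_true_eq] at this
        omega) hf).symm
    | none =>
      have : (keys.filter (fun c => (pvKey c).isPrefixOf w && decide ((pvKey c).length ≤ 0))) = [] := by
        rw [List.eq_nil_iff_forall_not_mem]
        intro c hc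
        have h2 := (List.mem_filter.mp hc).2
        simp only [Bool.and_eq_true, decide_eq_true_eq] at h2
        have := List.find?_eq_none.mp hf c hc
        simp only [beq_iff_eq] at this
        omega
      rw [hf] at hb
      simp only [pvDesc, List.findSome?_cons, hb, List.findSome?_nil]
      rw [this]
      rfl
  | succ k ih =>
    intro hn
    have hb := pv_find_bridge keys w (k+1) hn
    cases hf : (keys.filter (fun c => (pvKey c).isPrefixOf w && decide ((pvKey c).length ≤ k+1))).find?
        (fun c => (pvKey c).length == k+1) with
    | some c₀ =>
      rw [hf] at hb
      simp only [pvDesc, List.findSome?_cons, hb]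
      exact (pv_fold_find (k+1) c₀ _ (fun c hc => by
        have := (List.mem_filter.mp hc).2
        simp only [Bool.and_eq_true, decide_eq_true_eq] at this
        omega) hf).symm
    | none =>
      have hfil : (keys.filter (fun c => (pvKey c).isPrefixOf w && decide ((pvKey c).length ≤ k+1)))
          = (keys.filter (fun c => (pvKey c).isPrefixOf w && decide ((pvKey c).length ≤ k))) := by
        apply List.filter_congr
        intro c hc
        cases hp : (pvKey c).isPrefixOf w with
        | false => simp only [Bool.false_and]
        | true =>
          simp only [Bool.true_and, decide_eq_decide]
          constructor
          · intro hle
            rcases Nat.lt_or_ge (pvKey c).length (k+1) with h | h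
            · omega
            · exfalso
              have hmem : c ∈ keys.filter (fun c => (pvKey c).isPrefixOf w && decide ((pvKey c).length ≤ k+1)) :=
                List.mem_filter.mpr ⟨hc, by simp only [hp, Bool.true_and, decide_eq_true_eq]; omega⟩
              have := List.find?_eq_none.mp hf c hmem
              simp only [beq_iff_eq] at this
              omega
          · intro h; omega
      rw [hf] at hb
      simp only [pvDesc, List.findSome?_cons, hb]
      rw [hfil, ih (by omega)]

theorem pv_len_key (s : String) : (pvKey s).length = s.toList.length := by
  simp [pvKey, PySem.Chars.lower]

-- A's running-best loop equals the first-seen-longest fold over the filtered keys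
theorem pv_foldl_best_eq (p : String → Bool) (l : List String) :
    ∀ (b : Option String),
      l.foldl (fun best cab =>
        if p cab &&
           (match best with
            | none => true
            | some bb => decide (PySem.Str.len cab > PySem.Str.len bb))
        then some cab else best) b
      = (l.filter p).foldl pvMaxF b := by
  induction l with
  | nil => intro b; rfl
  | cons c t ih =>
    intro b
    rw [List.foldl_cons, List.filter_cons]
    by_cases hp : p c = true
    · rw [if_pos hp, List.foldl_cons, ih]
      congr 1
      cases b with
      | none => simp [hp, pvMaxF]
      | some m =>
        simp only [hp, Bool.true_and, pvMaxF, gt_iff_lt, PySem.Str.len_eq, Nat.cast_lt,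
          pv_len_key, decide_eq_true_eq]
    · rw [if_neg hp, ih]
      congr 1
      simp [hp]

theorem extract_cabinet_eq_alt (dp_name : String) (cab_to_block : List (String × String)) :
    extract_cabinet dp_name cab_to_block = extract_cabinet_alt dp_name cab_to_block := by
  unfold extract_cabinet extract_cabinet_alt pvFindCab
  by_cases hgt : PySem.Str.isIn ">" dp_name = true
  · rw [if_pos hgt, if_pos hgt]
    simp only [pv_lowmap_find]
  · rw [if_neg hgt, if_neg hgt]
    rw [pv_foldl_best_eq]
    simp only [pv_lowmap_find]   -- also zeta-reduces the `let`s
    rw [PySem.Str.len_eq, pv_pyRange_desc, List.findSome?_map]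
    set low := PySem.Str.lower dp_name with hlow
    set w : List Char := low.toList with hw
    have hstep : ((fun L => (cab_to_block.map Prod.fst).find? (fun cab => PySem.Str.lower cab == PySem.Str.slice low none (some L))) ∘ (fun i => Int.ofNat i))
        = fun L => (cab_to_block.map Prod.fst).find? (fun c => pvKey c == w.take L) := by
      funext L
      simp only [Function.comp_apply]
      congr 1
      funext c
      apply Bool.eq_iff_iff.mpr
      simp only [beq_iff_eq, String.ext_iff, PySem.Str.toList_lower, PySem.Str.toList_slice,
        PySem.Chars.slice_eq_listSlice, Int.ofNat_eq_natCast, PySem.List.slice_to_natCast, pvKey]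
      rw [hw]
    rw [hstep, pv_main _ w _ (le_refl _)]
    congr 1
    apply List.filter_congr
    intro c _
    apply Bool.eq_iff_iff.mpr
    rw [PySem.Str.startswith_eq]
    rw [show (PySem.Str.lower c).toList = pvKey c from by simp [pvKey]]
    rw [PySem.Chars.startswith_iff]
    simp only [Bool.and_eq_true, List.isPrefixOf_iff_prefix, decide_eq_true_eq]
    constructor
    · intro h; exact ⟨h, h.length_le⟩
    · intro h; exact h.1

-- ===== VERDICT (by name: the statement is the Claim_ definition above) =====
theorem extract_cabinet_spec : Claim_equal_extract_cabinet := by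
  intro dp_name cab_to_block _
  unfold Spec_extract_cabinet
  exact extract_cabinet_eq_alt dp_name cab_to_block
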